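-- pv_equiv track=rewrite | github.com/KamalS-netizen/ai-transition | day14_automation_workflow.py | build_total_category_counts
-- ===== SOURCE A (Python) =====
-- def build_total_category_counts(results):
--     total_category_counts = {
--         "login": 0,
--         "payment": 0,
--         "refund": 0,
--         "other": 0
--     }
--
--     for ticket in results:
--         category = ticket["category"]
--
--         if category in total_category_counts:
--             total_category_counts[category] += 1
--         else:
--             total_category_counts["other"] += 1
--
--     return total_category_counts
-- ===== SOURCE B (Python) =====
-- def build_total_category_counts(results):
--     cats = [t["category"] for t in results]
--     out = {k: cats.count(k) for k in ("login", "payment", "refund")}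
--     out["other"] = len(cats) - sum(out.values())
--     return out
-- ===== Notes on version B (the rewrite author's own statement) =====
-- stated objective: idiomatic
-- what changed: Replaces the stateful dict-update loop with a two-phase pipeline: extract the category list once, fill the three known keys via list.count, and derive 'other' arithmetically as len(cats) minus the known counts.
import Mathlib
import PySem

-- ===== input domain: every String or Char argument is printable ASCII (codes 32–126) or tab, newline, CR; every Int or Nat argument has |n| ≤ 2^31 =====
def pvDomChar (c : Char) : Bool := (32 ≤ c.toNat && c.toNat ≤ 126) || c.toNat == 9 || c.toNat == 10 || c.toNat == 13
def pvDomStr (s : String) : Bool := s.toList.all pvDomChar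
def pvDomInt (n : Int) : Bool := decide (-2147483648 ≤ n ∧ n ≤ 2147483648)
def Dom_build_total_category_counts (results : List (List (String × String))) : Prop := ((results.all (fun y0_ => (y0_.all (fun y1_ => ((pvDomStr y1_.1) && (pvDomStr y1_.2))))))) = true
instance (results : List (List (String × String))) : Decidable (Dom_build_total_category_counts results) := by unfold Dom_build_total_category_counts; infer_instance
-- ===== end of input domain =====

-- B rebuilds the result from one extracted category list (counts + arithmetic 'other') instead of A's in-place dict updates; same O(n) cost, plainer shape.

-- ===== PORT A =====
-- ticket["category"]; Pre_ guarantees the key is present, so the "" default is never used (Python raises KeyError there).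
def pvCat (t : List (String × String)) : String :=
  ((PySem.Dict.mk t).get? "category").getD ""

def build_total_category_counts (results : List (List (String × String))) : List (String × Int) :=
  (results.foldl
    (fun d ticket =>
      let category := pvCat ticket
      if d.contains category then d.modify category 0 (· + 1)
      else d.modify "other" 0 (· + 1))
    (PySem.Dict.mk [("login", 0), ("payment", 0), ("refund", 0), ("other", 0)])).items

-- ===== PORT B =====
def build_total_category_counts_alt (results : List (List (String × String))) : List (String × Int) :=
  let cats := results.map pvCat
  let out : List (String × Int) :=
    [("login", (cats.count "login" : Int)),
     ("payment", (cats.count "payment" : Int)),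
     ("refund", (cats.count "refund" : Int))]
  out ++ [("other", (cats.length : Int) - (out.map (·.2)).sum)]

-- ===== PRECONDITION & SPEC =====
-- Pre_ excludes exactly the tickets without a "category" key, on which Python A raises KeyError (returns nothing).
def Pre_build_total_category_counts (results : List (List (String × String))) : Prop :=
  ∀ t ∈ results, ∃ p ∈ t, p.1 = "category"
instance (results : List (List (String × String))) : Decidable (Pre_build_total_category_counts results) := by unfold Pre_build_total_category_counts; infer_instance

def pvWitness_build_total_category_counts : (List (List (String × String))) :=
  [[("category", "login")], [("category", "spam")]]

def Spec_build_total_category_counts (results : List (List (String × String))) (out : List (String × Int)) : Prop := out = build_total_category_counts_alt results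
instance (results : List (List (String × String))) (out : List (String × Int)) : Decidable (Spec_build_total_category_counts results out) := by unfold Spec_build_total_category_counts; infer_instance

-- ===== CLAIM (what is proved, stated in full; the proofs are below) =====
def Claim_equal_build_total_category_counts : Prop := ∀ (results : List (List (String × String))), Dom_build_total_category_counts results → Pre_build_total_category_counts results → Spec_build_total_category_counts results (build_total_category_counts results)

-- ===== LEMMAS AND PROOFS =====

-- Unknown categories are not keys of A's four-bucket dict.
lemma pvContains_false (a b c d : Int) (k : String)
    (h1 : ¬ k = "login") (h2 : ¬ k = "payment") (h3 : ¬ k = "refund") (h4 : ¬ k = "other") :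
    (PySem.Dict.mk [("login", a), ("payment", b), ("refund", c), ("other", d)]).contains k = false := by
  simp [PySem.Dict.contains_mk, Ne.symm h1, Ne.symm h2, Ne.symm h3, Ne.symm h4]

-- A's loop, started from any four-bucket dict, adds the per-category counts to the buckets.
lemma pvFoldA_eq (ts : List (List (String × String))) (a b c d : Int) :
    (ts.foldl
      (fun d ticket =>
        let category := pvCat ticket
        if d.contains category then d.modify category 0 (· + 1)
        else d.modify "other" 0 (· + 1))
      (PySem.Dict.mk [("login", a), ("payment", b), ("refund", c), ("other", d)])) =
    PySem.Dict.mk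
      [("login", a + ((ts.map pvCat).count "login" : Int)),
       ("payment", b + ((ts.map pvCat).count "payment" : Int)),
       ("refund", c + ((ts.map pvCat).count "refund" : Int)),
       ("other", d + ((ts.length : Int) - ((ts.map pvCat).count "login" : Int)
                      - ((ts.map pvCat).count "payment" : Int)
                      - ((ts.map pvCat).count "refund" : Int)))] := by
  induction ts generalizing a b c d with
  | nil => simp
  | cons t ts ih =>
    simp only [List.foldl_cons]
    by_cases h1 : pvCat t = "login"
    · rw [show (if (PySem.Dict.mk [("login", a), ("payment", b), ("refund", c), ("other", d)]).contains (pvCat t) = true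
            then (PySem.Dict.mk [("login", a), ("payment", b), ("refund", c), ("other", d)]).modify (pvCat t) 0 (· + 1)
            else (PySem.Dict.mk [("login", a), ("payment", b), ("refund", c), ("other", d)]).modify "other" 0 (· + 1)) =
          PySem.Dict.mk [("login", a + 1), ("payment", b), ("refund", c), ("other", d)] from by
        simp only [h1]; congr 1]
      rw [ih]
      simp [h1, List.count_cons]
      all_goals omega
    · by_cases h2 : pvCat t = "payment"
      · rw [show (if (PySem.Dict.mk [("login", a), ("payment", b), ("refund", c), ("other", d)]).contains (pvCat t) = true
              then (PySem.Dict.mk [("login", a), ("payment", b), ("refund", c), ("other", d)]).modify (pvCat t) 0 (· + 1)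
              else (PySem.Dict.mk [("login", a), ("payment", b), ("refund", c), ("other", d)]).modify "other" 0 (· + 1)) =
            PySem.Dict.mk [("login", a), ("payment", b + 1), ("refund", c), ("other", d)] from by
          simp only [h2]; congr 1]
        rw [ih]
        simp [h1, h2, List.count_cons]
        all_goals omega
      · by_cases h3 : pvCat t = "refund"
        · rw [show (if (PySem.Dict.mk [("login", a), ("payment", b), ("refund", c), ("other", d)]).contains (pvCat t) = true
                then (PySem.Dict.mk [("login", a), ("payment", b), ("refund", c), ("other", d)]).modify (pvCat t) 0 (· + 1)
                else (PySem.Dict.mk [("login", a), ("payment", b), ("refund", c), ("other", d)]).modify "other" 0 (· + 1)) =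
              PySem.Dict.mk [("login", a), ("payment", b), ("refund", c + 1), ("other", d)] from by
            simp only [h3]; congr 1]
          rw [ih]
          simp [h1, h2, h3, List.count_cons]
          all_goals omega
        · by_cases h4 : pvCat t = "other"
          · rw [show (if (PySem.Dict.mk [("login", a), ("payment", b), ("refund", c), ("other", d)]).contains (pvCat t) = true
                  then (PySem.Dict.mk [("login", a), ("payment", b), ("refund", c), ("other", d)]).modify (pvCat t) 0 (· + 1)
                  else (PySem.Dict.mk [("login", a), ("payment", b), ("refund", c), ("other", d)]).modify "other" 0 (· + 1)) =
                PySem.Dict.mk [("login", a), ("payment", b), ("refund", c), ("other", d + 1)] from by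
              simp only [h4]; congr 1]
            rw [ih]
            simp [h1, h2, h3, h4]
            all_goals omega
          · rw [show (if (PySem.Dict.mk [("login", a), ("payment", b), ("refund", c), ("other", d)]).contains (pvCat t) = true
                  then (PySem.Dict.mk [("login", a), ("payment", b), ("refund", c), ("other", d)]).modify (pvCat t) 0 (· + 1)
                  else (PySem.Dict.mk [("login", a), ("payment", b), ("refund", c), ("other", d)]).modify "other" 0 (· + 1)) =
                PySem.Dict.mk [("login", a), ("payment", b), ("refund", c), ("other", d + 1)] from by
              rw [pvContains_false a b c d _ h1 h2 h3 h4]; congr 1]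
            rw [ih]
            simp [h1, h2, h3, List.count_cons]
            all_goals omega

-- ===== VERDICT (by name: the statement is the Claim_ definition above) =====
theorem build_total_category_counts_spec : Claim_equal_build_total_category_counts := by
  intro results _ _
  unfold Spec_build_total_category_counts build_total_category_counts build_total_category_counts_alt
  rw [pvFoldA_eq]
  simp
  ring
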